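-- pv_equiv track=rewrite | github.com/FreeSideNomad/requirements-generator | src/domain/models/domain_services.py | _extract_domain_terms
-- ===== SOURCE A (Python) =====
-- from typing import List, Dict, Any, Optional, Set
--
-- def _extract_domain_terms(text: str) -> Set[str]:
--     """Extract domain-specific terms from text."""
--     # Simple extraction - in practice, this would use NLP techniques
--     business_terms = set()
--     words = text.split()
--
--     # Common business domain terms
--     domain_keywords = [
--         'user', 'customer', 'order', 'product', 'account', 'payment',
--         'invoice', 'subscription', 'profile', 'preferences', 'settings',
--         'notification', 'report', 'dashboard', 'analytics', 'metric'
--     ]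
--
--     for word in words:
--         clean_word = word.lower().strip('.,!?()[]{}":;')
--         if clean_word in domain_keywords and len(clean_word) > 2:
--             business_terms.add(clean_word)
--
--     return business_terms
-- ===== SOURCE B (Python) =====
-- def _extract_domain_terms(text: str):
--     """Extract domain-specific terms from text (divide-and-conquer over the word list)."""
--     domain_keywords = frozenset([
--         'user', 'customer', 'order', 'product', 'account', 'payment',
--         'invoice', 'subscription', 'profile', 'preferences', 'settings',
--         'notification', 'report', 'dashboard', 'analytics', 'metric'
--     ])
--
--     def go(words):
--         if not words:
--             return set()
--         if len(words) == 1: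
--             clean = words[0].lower().strip('.,!?()[]{}":;')
--             return {clean} if clean in domain_keywords else set()
--         mid = len(words) // 2
--         return go(words[:mid]) | go(words[mid:])
--
--     return go(text.split())
-- ===== Notes on version B (the rewrite author's own statement) =====
-- stated objective: alternative
-- what changed: B replaces A's single linear pass with a membership-accumulating set by a divide-and-conquer recursion: it splits the word list in halves, solves each half, and combines the results with set union (the redundant len>2 guard is dropped since every keyword has length >= 4).
import Mathlib
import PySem

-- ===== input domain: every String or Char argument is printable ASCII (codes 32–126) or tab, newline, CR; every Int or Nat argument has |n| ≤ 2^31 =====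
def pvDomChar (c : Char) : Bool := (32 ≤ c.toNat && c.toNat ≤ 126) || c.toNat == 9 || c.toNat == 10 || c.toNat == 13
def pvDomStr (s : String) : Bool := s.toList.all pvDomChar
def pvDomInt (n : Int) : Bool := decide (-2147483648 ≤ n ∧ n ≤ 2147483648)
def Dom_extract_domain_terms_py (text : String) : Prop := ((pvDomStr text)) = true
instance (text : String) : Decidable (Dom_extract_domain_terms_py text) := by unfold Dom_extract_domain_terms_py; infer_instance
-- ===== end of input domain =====

-- B replaces A's linear accumulate-into-a-set pass by a divide-and-conquer recursion
-- (split the word list in halves, combine with set union); the len>2 guard is redundant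
-- since every keyword has length ≥ 4.

-- ===== PORT A =====
def pvKeywords : List String :=
  ["user", "customer", "order", "product", "account", "payment",
   "invoice", "subscription", "profile", "preferences", "settings",
   "notification", "report", "dashboard", "analytics", "metric"]

def pvClean (w : String) : String :=
  PySem.Str.stripChars (PySem.Str.lower w) ".,!?()[]{}\":;"

def extract_domain_terms_py (text : String) : List String :=
  (PySem.Str.split₀ text).foldl
    (fun business_terms word =>
      let clean_word := pvClean word
      if pvKeywords.contains clean_word && decide (2 < PySem.Str.len clean_word) then
        PySem.Set.add business_terms clean_word
      else business_terms)
    PySem.Set.empty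

-- ===== PORT B =====
-- B's `go(words)`: `words[:mid]` / `words[mid:]` with 0 ≤ mid ≤ len(words) are exactly
-- List.take/drop (PySem.List.slice_to / slice_from), and `len(words) // 2` on a Nat length
-- is exactly Nat division; `words[0]` in the length-1 branch is the head.
def pvGo (words : List String) : List String :=
  if words.length = 0 then []
  else if words.length = 1 then
    let clean := pvClean (words.headD "")
    if pvKeywords.contains clean then [clean] else []
  else
    let mid := words.length / 2
    PySem.Set.union (pvGo (words.take mid)) (pvGo (words.drop mid))
termination_by words.length
decreasing_by
  · simp only [List.length_take]; omega
  · simp only [List.length_drop]; omega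

def extract_domain_terms_py_alt (text : String) : List String :=
  pvGo (PySem.Str.split₀ text)

-- ===== PRECONDITION & SPEC =====
def Spec_extract_domain_terms_py (text : String) (out : List String) : Prop := out = extract_domain_terms_py_alt text
instance (text : String) (out : List String) : Decidable (Spec_extract_domain_terms_py text out) := by unfold Spec_extract_domain_terms_py; infer_instance

-- ===== CLAIM (what is proved, stated in full; the proofs are below) =====
def Claim_equal_extract_domain_terms_py : Prop := ∀ (text : String), Dom_extract_domain_terms_py text → Spec_extract_domain_terms_py text (extract_domain_terms_py text)

-- ===== LEMMAS AND PROOFS =====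

-- every keyword has length > 2, so A's extra guard never changes the condition
theorem pv_guard_redundant (w : String) :
    (pvKeywords.contains w && decide (2 < PySem.Str.len w)) = pvKeywords.contains w := by
  by_cases h : pvKeywords.contains w = true
  · simp only [h, Bool.true_and]
    simp only [pvKeywords, List.contains_eq_mem, List.mem_cons, List.not_mem_nil, or_false,
      decide_eq_true_eq] at h
    rcases h with h | h | h | h | h | h | h | h | h | h | h | h | h | h | h | h <;> subst h <;> decide
  · simp only [Bool.not_eq_true] at h
    simp only [h, Bool.false_and]

-- a conditional accumulate over l is a plain Set.add fold over the filtered image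
theorem pv_foldl_filter (f : String → String) (p : String → Bool)
    (l : List String) (s : List String) :
    l.foldl (fun s w => if p (f w) then PySem.Set.add s (f w) else s) s
      = ((l.map f).filter p).foldl PySem.Set.add s := by
  induction l generalizing s with
  | nil => rfl
  | cons x xs ih =>
    simp only [List.foldl_cons, List.map_cons, List.filter_cons]
    by_cases h : p (f x) = true
    · simp [h, ih]
    · simp only [Bool.not_eq_true] at h
      simp [h, ih]

-- folding Set.add over the deduplicated list is folding it over the original list
theorem pv_update_ofList (l s : List String) :
    PySem.Set.update s (PySem.Set.ofList l) = PySem.Set.update s l := by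
  induction l using List.reverseRecOn with
  | nil => rfl
  | append_singleton xs x ih =>
    have hR : PySem.Set.update (PySem.Set.update s xs) [x]
        = PySem.Set.add (PySem.Set.update s xs) x := rfl
    rw [PySem.Set.ofList_append_singleton, PySem.Set.update_append, hR,
      PySem.Set.add_eq_ite (s := PySem.Set.ofList xs)]
    by_cases hx : x ∈ PySem.Set.ofList xs
    · have hxs : x ∈ xs := (PySem.Set.mem_ofList xs x).mp hx
      have hmem : x ∈ PySem.Set.update s xs := (PySem.Set.mem_update s xs x).mpr (Or.inr hxs)
      rw [if_pos hx, ih, PySem.Set.add_eq_ite, if_pos hmem]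
    · rw [if_neg hx, PySem.Set.update_append, ih]
      rfl

-- the divide-and-conquer recursion computes the ordered dedup of the matching cleaned words
theorem pv_go_spec (words : List String) :
    pvGo words
      = PySem.Set.ofList ((words.map pvClean).filter (fun w => pvKeywords.contains w)) := by
  induction words using pvGo.induct with
  | case1 words h0 =>
    have : words = [] := List.eq_nil_of_length_eq_zero h0
    subst this
    rw [pvGo]; rfl
  | case2 words h0 h1 hkw =>
    obtain ⟨w, hw⟩ := List.length_eq_one_iff.mp h1
    subst hw
    rw [pvGo]
    by_cases h : pvClean w ∈ pvKeywords <;>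
      simp [h, PySem.Set.ofList, PySem.Set.add]
  | case3 words h0 h1 hkw =>
    obtain ⟨w, hw⟩ := List.length_eq_one_iff.mp h1
    subst hw
    rw [pvGo]
    by_cases h : pvClean w ∈ pvKeywords <;>
      simp [h, PySem.Set.ofList, PySem.Set.add]
  | case4 words h0 h1 mid ih1 ih2 =>
    rw [pvGo, if_neg h0, if_neg h1]
    show PySem.Set.union (pvGo (List.take mid words)) (pvGo (List.drop mid words)) = _
    rw [ih1, ih2]
    rw [PySem.Set.union_eq_update, pv_update_ofList]
    conv_rhs => rw [← List.take_append_drop mid words, List.map_append, List.filter_append,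
      PySem.Set.ofList, List.foldl_append]
    rfl

-- ===== VERDICT (by name: the statement is the Claim_ definition above) =====
theorem extract_domain_terms_py_spec : Claim_equal_extract_domain_terms_py := by
  intro text _
  show extract_domain_terms_py text = extract_domain_terms_py_alt text
  unfold extract_domain_terms_py extract_domain_terms_py_alt
  have hguard :
      (fun (s : List String) (word : String) =>
          let clean_word := pvClean word
          if pvKeywords.contains clean_word && decide (2 < PySem.Str.len clean_word) then
            PySem.Set.add s clean_word
          else s)
        = fun s word =>
            if pvKeywords.contains (pvClean word) then PySem.Set.add s (pvClean word) else s := by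
    funext s word
    simp only [pv_guard_redundant]
  rw [hguard, pv_foldl_filter pvClean (fun w => pvKeywords.contains w), pv_go_spec]
  rfl
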